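-- pv_equiv track=rewrite | github.com/AugustDanell/Kattis-Assignments | Python/tetris.py | tall_piece
-- ===== SOURCE A (Python) =====
-- def tall_piece(top_row):
--     fits = 0
--     for i in range(len(top_row)):
--         fits += 1 # Increment for the standing piece (x x x x)^T, where T is transponate.
--
--         # Handle lying fit (x x x x) :
--         if(i + 3 < len(top_row)):
--             if(top_row[i] == top_row[i+1] == top_row[i+2] == top_row[i+3]):
--                 fits += 1
--
--     return fits
-- ===== SOURCE B (Python) =====
-- def tall_piece(top_row):
--     # One standing fit per column, plus lying fits counted per run of equal heights:
--     # a run of length L contributes max(0, L - 3) windows of four equal values.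
--     fits = len(top_row)
--     if not top_row:
--         return fits
--     prev = top_row[0]
--     run = 1
--     for x in top_row[1:]:
--         if x == prev:
--             run += 1
--         else:
--             fits += max(0, run - 3)
--             prev = x
--             run = 1
--     fits += max(0, run - 3)
--     return fits
-- ===== Notes on version B (the rewrite author's own statement) =====
-- stated objective: alternative
-- what changed: B replaces A's per-index 4-element window test (three indexed comparisons at every position) with a single run-length scan that tracks the length of the current run of equal values and adds max(0, run-3) per run.
import Mathlib
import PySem

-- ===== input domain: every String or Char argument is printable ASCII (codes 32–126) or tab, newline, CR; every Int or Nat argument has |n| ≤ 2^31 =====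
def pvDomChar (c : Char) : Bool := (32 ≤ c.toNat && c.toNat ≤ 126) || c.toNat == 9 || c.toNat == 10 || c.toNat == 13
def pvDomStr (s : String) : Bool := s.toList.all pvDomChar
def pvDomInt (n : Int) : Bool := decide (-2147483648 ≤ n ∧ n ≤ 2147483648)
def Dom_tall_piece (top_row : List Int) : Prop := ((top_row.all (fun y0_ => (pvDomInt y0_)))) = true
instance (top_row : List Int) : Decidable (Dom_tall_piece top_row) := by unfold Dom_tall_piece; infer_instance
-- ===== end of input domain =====

-- B counts lying fits by a run-length scan (adding max(0, run-3) per run of equal values) instead of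
-- A's independent 4-element window test at every index; a different decomposition of the same O(n) count.

-- ===== PORT A =====
def tall_piece (top_row : List Int) : Int :=
  (PySem.List.pyRange 0 (PySem.List.len top_row) 1).foldl
    (fun fits i =>
      let fits := fits + 1
      if i + 3 < PySem.List.len top_row then
        if (PySem.List.pyGet? top_row i == PySem.List.pyGet? top_row (i+1)
            && PySem.List.pyGet? top_row (i+1) == PySem.List.pyGet? top_row (i+2)
            && PySem.List.pyGet? top_row (i+2) == PySem.List.pyGet? top_row (i+3)) then
          fits + 1
        else fits
      else fits) 0

-- ===== PORT B =====
def tallLoop (prev run fits : Int) : List Int → Int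
  | [] => fits + max 0 (run - 3)
  | x :: t =>
    if x = prev then tallLoop prev (run + 1) fits t
    else tallLoop x 1 (fits + max 0 (run - 3)) t

def tall_piece_alt (top_row : List Int) : Int :=
  match top_row with
  | [] => PySem.List.len top_row
  | p :: t => tallLoop p 1 (PySem.List.len top_row) t

-- ===== PRECONDITION & SPEC =====
def Spec_tall_piece (top_row : List Int) (out : Int) : Prop := out = tall_piece_alt top_row
instance (top_row : List Int) (out : Int) : Decidable (Spec_tall_piece top_row out) := by unfold Spec_tall_piece; infer_instance

-- ===== CLAIM (what is proved, stated in full; the proofs are below) =====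
def Claim_equal_tall_piece : Prop := ∀ (top_row : List Int), Dom_tall_piece top_row → Spec_tall_piece top_row (tall_piece top_row)

-- ===== LEMMAS AND PROOFS =====

-- indicator of a 4-equal window at the head of the list
def win4 : List Int → Int
  | a :: b :: c :: d :: _ => if a = b ∧ b = c ∧ c = d then 1 else 0
  | _ => 0

-- total number of 4-equal windows in the list
def W : List Int → Int
  | [] => 0
  | a :: t => win4 (a :: t) + W t

-- per-index contribution of A's loop body (1 for the standing piece, +1 for a lying fit)
def gA (l : List Int) (i : Int) : Int :=
  if i + 3 < PySem.List.len l then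
    if (PySem.List.pyGet? l i == PySem.List.pyGet? l (i+1)
        && PySem.List.pyGet? l (i+1) == PySem.List.pyGet? l (i+2)
        && PySem.List.pyGet? l (i+2) == PySem.List.pyGet? l (i+3)) then 2 else 1
  else 1

theorem tall_piece_eq_sum (l : List Int) :
    tall_piece l = ((PySem.List.pyRange 0 (PySem.List.len l) 1).map (gA l)).sum := by
  have h : (fun (fits : Int) (i : Int) =>
      let fits := fits + 1
      if i + 3 < PySem.List.len l then
        if (PySem.List.pyGet? l i == PySem.List.pyGet? l (i+1)
            && PySem.List.pyGet? l (i+1) == PySem.List.pyGet? l (i+2)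
            && PySem.List.pyGet? l (i+2) == PySem.List.pyGet? l (i+3)) then
          fits + 1
        else fits
      else fits) = fun fits i => fits + gA l i := by
    funext fits i
    simp only [gA]
    split_ifs <;> ring
  rw [tall_piece, h, PySem.List.foldl_add, zero_add]

theorem gA_zero (l : List Int) : gA l 0 = 1 + win4 l := by
  rcases l with _|⟨a,_|⟨b,_|⟨c,_|⟨d,t⟩⟩⟩⟩ <;>
    simp [gA, win4, PySem.List.pyGet?, PySem.List.pyIdx?, and_assoc] <;> split_ifs <;> simp_all <;> omega

theorem gA_shift (a : Int) (t : List Int) (k : Nat) :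
    gA (a :: t) (1 + (k : Int)) = gA t (k : Int) := by
  have h0 : (1 + (k:Int)) = ((k:Int) + 1) := by ring
  have h1 : ((k:Int) + 1 + 1) = (((k+1:Nat):Int) + 1) := by push_cast; ring
  have h2 : ((k:Int) + 1 + 2) = (((k+2:Nat):Int) + 1) := by push_cast; ring
  have h3 : ((k:Int) + 1 + 3) = (((k+3:Nat):Int) + 1) := by push_cast; ring
  simp only [gA, h0, h1, h2, h3, PySem.List.pyGet?_cons_succ]
  push_cast
  simp only [PySem.List.len_eq, List.length_cons]
  push_cast
  have hc : (((k:Int) + 3 + 1 < (t.length:Int) + 1)) ↔ ((k:Int) + 3 < (t.length:Int)) := by omega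
  simp only [hc]
  rfl

theorem pyRange_shift (n : Int) :
    PySem.List.pyRange 1 (n + 1) = (PySem.List.pyRange 0 n).map (fun i => 1 + i) := by
  rw [PySem.List.pyRange_one, PySem.List.pyRange_one, List.map_map]
  have h1 : (n + 1 - 1).toNat = (n - 0).toNat := by omega
  rw [h1]
  apply List.map_congr_left
  intro x _
  simp

theorem sum_gA (l : List Int) :
    ((PySem.List.pyRange 0 (PySem.List.len l) 1).map (gA l)).sum = PySem.List.len l + W l := by
  induction l with
  | nil => simp [W]
  | cons a t ih =>
    simp only [PySem.List.len_eq, List.length_cons] at *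
    have hcast : ((t.length + 1 : Nat) : Int) = (t.length : Int) + 1 := by push_cast; ring
    have hpos : (0:Int) < (t.length:Int) + 1 := by positivity
    rw [hcast, PySem.List.pyRange_one_cons hpos, List.map_cons, List.sum_cons]
    have h01 : (0:Int) + 1 = 1 := by norm_num
    rw [h01, pyRange_shift, List.map_map]
    have hmap : ((PySem.List.pyRange 0 ((t.length:Int))).map (gA (a :: t) ∘ fun i => 1 + i))
        = (PySem.List.pyRange 0 ((t.length:Int))).map (gA t) := by
      apply List.map_congr_left
      intro i hi
      have hmem := PySem.List.mem_pyRange_one.mp hi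
      have h0i : 0 ≤ i := hmem.1
      have : i = ((i.toNat : Nat) : Int) := by omega
      rw [Function.comp, this]
      exact gA_shift a t i.toNat
    rw [hmap, gA_zero, ih]
    simp [W]
    ring

theorem win4_short (p x : Int) (t : List Int) (h : x ≠ p) :
    ∀ r : Nat, r ≤ 2 → win4 (List.replicate (r + 1) p ++ x :: t) = 0 := by
  intro r hr
  interval_cases r <;> rcases t with _|⟨c,_|⟨d,t⟩⟩ <;> simp [List.replicate, win4] <;> tauto

theorem W_run (p : Int) (s : List Int) (hs : s = [] ∨ ∃ x t, s = x :: t ∧ x ≠ p) :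
    ∀ r : Nat, W (List.replicate r p ++ s) = max 0 ((r : Int) - 3) + W s := by
  intro r
  induction r with
  | zero => simp
  | succ n ih =>
    have hcons : List.replicate (n + 1) p ++ s = p :: (List.replicate n p ++ s) := by
      simp [List.replicate_succ]
    have hwin : win4 (List.replicate (n + 1) p ++ s) = if 3 ≤ n then 1 else 0 := by
      rcases Nat.lt_or_ge n 3 with hn | hn
      · rw [if_neg (by omega)]
        rcases hs with rfl | ⟨x, t, rfl, hx⟩
        · interval_cases n <;> simp [List.replicate, win4]
        · exact win4_short p x t hx n (by omega)
      · rw [if_pos hn]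
        obtain ⟨m, rfl⟩ := Nat.exists_eq_add_of_le hn
        show win4 (List.replicate (3 + m + 1) p ++ s) = 1
        have : (3 + m + 1) = (m + 1) + 3 := by ring
        rw [this]
        simp [List.replicate, win4]
    rw [hcons, W, ← hcons, hwin, ih]
    split_ifs with hn <;> push_cast <;> omega

theorem tallLoop_eq (t : List Int) : ∀ (prev fits : Int) (r : Nat),
    tallLoop prev (r : Int) fits t = fits + W (List.replicate r prev ++ t) := by
  induction t with
  | nil =>
    intro prev fits r
    rw [W_run prev [] (Or.inl rfl) r]
    simp [tallLoop, W]
  | cons x t ih =>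
    intro prev fits r
    by_cases hx : x = prev
    · subst hx
      rw [show tallLoop x (r:Int) fits (x :: t) = tallLoop x ((r:Int) + 1) fits t from by
        simp [tallLoop]]
      have hc : ((r:Int) + 1) = (((r+1:Nat)):Int) := by push_cast; ring
      rw [hc, ih x fits (r+1)]
      congr 2
      rw [List.replicate_succ']
      simp
    · rw [show tallLoop prev (r:Int) fits (x :: t) =
          tallLoop x 1 (fits + max 0 ((r:Int) - 3)) t from by simp [tallLoop, hx]]
      have h1 : (1:Int) = ((1:Nat):Int) := by norm_num
      rw [h1, ih x (fits + max 0 ((r:Int) - 3)) 1,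
          W_run prev (x :: t) (Or.inr ⟨x, t, rfl, hx⟩) r]
      simp [List.replicate]
      ring

theorem alt_eq (l : List Int) : tall_piece_alt l = PySem.List.len l + W l := by
  cases l with
  | nil => simp [tall_piece_alt, W]
  | cons p t =>
    show tallLoop p 1 (PySem.List.len (p :: t)) t = _
    rw [show (1:Int) = ((1:Nat):Int) from by norm_num, tallLoop_eq t p _ 1]
    simp [List.replicate, W]

-- ===== VERDICT (by name: the statement is the Claim_ definition above) =====
theorem tall_piece_spec : Claim_equal_tall_piece := by
  intro l _
  show tall_piece l = tall_piece_alt l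
  rw [tall_piece_eq_sum, sum_gA, alt_eq]
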